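-- pv_equiv track=rewrite | github.com/caioboris/CT-Python | Lista6/exercico4.py | changeCharacter
-- ===== SOURCE A (Python) =====
-- def changeCharacter(frase, letra):
--     resp = ""
--     i = 0
--     for c in frase:
--         if(c in letra):
--             resp += "*"
--         else:
--             resp += c
--     return resp
-- ===== SOURCE B (Python) =====
-- def changeCharacter(frase, letra):
--     for c in letra:
--         frase = frase.replace(c, "*")
--     return frase
-- ===== Notes on version B (the rewrite author's own statement) =====
-- stated objective: alternative
-- what changed: Inverts the traversal: instead of scanning frase once and testing each character against letra, B loops over letra and rewrites the whole string with str.replace once per letter, so the inner membership test disappears entirely.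
import Mathlib
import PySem

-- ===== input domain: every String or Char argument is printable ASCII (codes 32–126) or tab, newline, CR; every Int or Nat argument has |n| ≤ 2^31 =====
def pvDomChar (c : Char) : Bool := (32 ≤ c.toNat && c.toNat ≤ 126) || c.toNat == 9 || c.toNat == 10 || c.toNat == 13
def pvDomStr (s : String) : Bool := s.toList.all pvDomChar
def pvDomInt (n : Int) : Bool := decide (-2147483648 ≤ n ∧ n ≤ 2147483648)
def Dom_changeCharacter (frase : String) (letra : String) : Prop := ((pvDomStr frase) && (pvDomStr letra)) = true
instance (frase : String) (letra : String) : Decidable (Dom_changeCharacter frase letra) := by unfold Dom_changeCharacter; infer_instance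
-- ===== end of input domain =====

-- B inverts the traversal: it loops over letra, rewriting frase with one str.replace pass per letter, instead of A's single scan of frase with a membership test per character (alternative; same results).
-- ===== PORT A =====
-- resp accumulates characters; 'c in letra' is membership of c among letra's characters (length-1 substring test).
def changeCharacter (frase : String) (letra : String) : String :=
  String.ofList (frase.toList.foldl
    (fun resp c => if letra.toList.contains c then resp ++ ['*'] else resp ++ [c]) [])

-- ===== PORT B =====
-- for c in letra: frase = frase.replace(c, "*"); return frase
def changeCharacter_alt (frase : String) (letra : String) : String :=
  letra.toList.foldl (fun s c => PySem.Str.replace s (String.ofList [c]) "*") frase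

-- ===== PRECONDITION & SPEC =====
def Spec_changeCharacter (frase : String) (letra : String) (out : String) : Prop := out = changeCharacter_alt frase letra
instance (frase : String) (letra : String) (out : String) : Decidable (Spec_changeCharacter frase letra out) := by unfold Spec_changeCharacter; infer_instance

-- ===== CLAIM (what is proved, stated in full; the proofs are below) =====
def Claim_equal_changeCharacter : Prop := ∀ (frase : String) (letra : String), Dom_changeCharacter frase letra → Spec_changeCharacter frase letra (changeCharacter frase letra)

-- ===== LEMMAS AND PROOFS =====

-- replacing a single character c by '*' is the pointwise map
lemma replace_go_single (c : Char) (l : List Char) (fuel : Nat) (acc : List Char)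
    (h : l.length ≤ fuel) :
    PySem.Chars.replace.go [c] ['*'] fuel l acc =
      acc.reverse ++ l.map (fun x => if x = c then '*' else x) := by
  induction l generalizing fuel acc with
  | nil =>
    cases fuel <;> simp [PySem.Chars.replace.go]
  | cons x t ih =>
    cases fuel with
    | zero => simp at h
    | succ n =>
      have ht : t.length ≤ n := by simp only [List.length_cons] at h; omega
      by_cases hx : x = c
      · subst hx
        show (if [x].isPrefixOf (x :: t) = true then
            PySem.Chars.replace.go [x] ['*'] n (List.drop [x].length (x :: t)) (['*'].reverse ++ acc)
          else PySem.Chars.replace.go [x] ['*'] n t (x :: acc)) = _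
        rw [if_pos (by simp [List.isPrefixOf])]
        rw [show List.drop [x].length (x :: t) = t by simp]
        rw [ih _ _ ht]
        simp
      · show (if [c].isPrefixOf (x :: t) = true then
            PySem.Chars.replace.go [c] ['*'] n (List.drop [c].length (x :: t)) (['*'].reverse ++ acc)
          else PySem.Chars.replace.go [c] ['*'] n t (x :: acc)) = _
        rw [if_neg (by simp [List.isPrefixOf, Ne.symm hx])]
        rw [ih _ _ ht]
        simp [hx]

lemma replace_single (c : Char) (l : List Char) :
    PySem.Chars.replace l [c] ['*'] = l.map (fun x => if x = c then '*' else x) := by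
  unfold PySem.Chars.replace
  rw [if_neg (by simp)]
  exact replace_go_single c l l.length [] le_rfl

-- B's per-letter passes collapse to one membership-mapped pass
lemma alt_toList (letters : List Char) (s : String) :
    (letters.foldl (fun s c => PySem.Str.replace s (String.ofList [c]) "*") s).toList =
      s.toList.map (fun x => if letters.contains x then '*' else x) := by
  induction letters generalizing s with
  | nil => simp
  | cons c t ih =>
    rw [List.foldl_cons, ih, PySem.Str.toList_replace]
    rw [show (String.ofList [c]).toList = [c] from String.toList_ofList]
    rw [show ("*" : String).toList = ['*'] by decide]
    rw [replace_single, List.map_map]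
    refine List.map_congr_left (fun x _ => ?_)
    simp only [Function.comp, List.contains_cons]
    by_cases h : x = c <;> simp [h]

-- A's accumulating loop is the mapped pass
lemma foldl_eq_map (letra : String) (l acc : List Char) :
    l.foldl (fun resp c => if letra.toList.contains c then resp ++ ['*'] else resp ++ [c]) acc =
      acc ++ l.map (fun c => if letra.toList.contains c then '*' else c) := by
  induction l generalizing acc with
  | nil => simp
  | cons c t ih =>
    rw [List.foldl_cons, List.map_cons, ih]
    by_cases h : c ∈ letra.toList <;> simp [h]

-- ===== VERDICT (by name: the statement is the Claim_ definition above) =====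
theorem changeCharacter_spec : Claim_equal_changeCharacter := by
  intro frase letra _
  unfold Spec_changeCharacter changeCharacter changeCharacter_alt
  rw [foldl_eq_map]
  have h := alt_toList letra.toList frase
  calc String.ofList ([] ++ frase.toList.map (fun c => if letra.toList.contains c then '*' else c))
      = String.ofList ((letra.toList.foldl
          (fun s c => PySem.Str.replace s (String.ofList [c]) "*") frase).toList) := by
        rw [h]; simp
    _ = _ := String.ofList_toList
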